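-- pv_equiv track=rewrite | github.com/42euge/learning-bench | datasets/novel_algorithm_execution/generate.py | helix_weave
-- ===== SOURCE A (Python) =====
-- def helix_weave(lst):
--     """Complex: interleave from both ends, apply conditional transforms, running weighted sum."""
--     n = len(lst)
--     interleaved = []
--     left, right = 0, n - 1
--     while left <= right:
--         interleaved.append(lst[left])
--         if left != right:
--             interleaved.append(lst[right])
--         left += 1
--         right -= 1
--
--     acc = 0
--     for i, v in enumerate(interleaved):
--         if v % 2 == 0:
--             contrib = v // 2
--         else:
--             contrib = v * 2
--         if i % 3 == 0:
--             acc += contrib * 3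
--         elif i % 3 == 1:
--             acc += contrib * 2
--         else:
--             acc -= contrib
--     return abs(acc)
-- ===== SOURCE B (Python) =====
-- def helix_weave(lst):
--     """Single pass over the original indices: compute each element's position
--     in the interleaved order by a closed formula instead of building the list."""
--     n = len(lst)
--     acc = 0
--     for j, v in enumerate(lst):
--         p = 2 * j if 2 * j <= n - 1 else 2 * (n - 1 - j) + 1
--         contrib = v // 2 if v % 2 == 0 else v * 2
--         acc += (3, 2, -1)[p % 3] * contrib
--     return abs(acc)
-- ===== Notes on version B (the rewrite author's own statement) =====
-- stated objective: alternative
-- what changed: B drops the interleaved intermediate list and the two-pointer build entirely: it makes one pass over the original indices, computing each element's position in the interleaved order by a closed formula and weighting via a tuple lookup.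
import Mathlib
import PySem

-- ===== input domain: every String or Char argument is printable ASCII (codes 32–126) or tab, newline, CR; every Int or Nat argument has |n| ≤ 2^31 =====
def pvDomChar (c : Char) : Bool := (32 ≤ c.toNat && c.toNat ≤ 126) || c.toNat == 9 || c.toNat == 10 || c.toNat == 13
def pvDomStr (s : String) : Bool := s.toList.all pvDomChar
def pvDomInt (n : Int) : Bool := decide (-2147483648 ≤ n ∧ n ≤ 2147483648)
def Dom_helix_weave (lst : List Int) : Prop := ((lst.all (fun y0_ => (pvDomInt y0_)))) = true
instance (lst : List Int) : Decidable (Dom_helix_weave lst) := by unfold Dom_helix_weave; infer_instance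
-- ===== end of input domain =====

-- B replaces A's two-pointer interleave-then-scan by a single pass over the original
-- indices with a closed-form position formula (objective: alternative, same cost).

-- ===== PORT A =====
-- A's while loop building `interleaved` from both ends.  `lst[left]` / `lst[right]`
-- are always in range when the loop body runs (0 ≤ left ≤ right ≤ n-1), so the
-- total `pyGetD … 0` is exact here.
def weaveAux (lst : List Int) (left right : Int) : List Int :=
  if _h : left ≤ right then
    [PySem.List.pyGetD lst left 0]
      ++ (if left ≠ right then [PySem.List.pyGetD lst right 0] else [])
      ++ weaveAux lst (left + 1) (right - 1)
  else []
termination_by (right + 1 - left).toNat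
decreasing_by omega

def helix_weave (lst : List Int) : Int :=
  let n := PySem.List.len lst
  let interleaved := weaveAux lst 0 (n - 1)
  let acc := (PySem.List.enumerate interleaved).foldl (fun acc iv =>
    let contrib := if PySem.Int.mod iv.2 2 = 0 then PySem.Int.floordiv iv.2 2 else iv.2 * 2
    if PySem.Int.mod iv.1 3 = 0 then acc + contrib * 3
    else if PySem.Int.mod iv.1 3 = 1 then acc + contrib * 2
    else acc - contrib) 0
  |acc|

-- ===== PORT B =====
def helix_weave_alt (lst : List Int) : Int :=
  let n := PySem.List.len lst
  let acc := (PySem.List.enumerate lst).foldl (fun acc jv =>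
    let p := if 2 * jv.1 ≤ n - 1 then 2 * jv.1 else 2 * (n - 1 - jv.1) + 1
    let contrib := if PySem.Int.mod jv.2 2 = 0 then PySem.Int.floordiv jv.2 2 else jv.2 * 2
    acc + PySem.List.pyGetD [3, 2, -1] (PySem.Int.mod p 3) 0 * contrib) 0
  |acc|

-- ===== PRECONDITION & SPEC =====
def Spec_helix_weave (lst : List Int) (out : Int) : Prop := out = helix_weave_alt lst
instance (lst : List Int) (out : Int) : Decidable (Spec_helix_weave lst out) := by unfold Spec_helix_weave; infer_instance

-- ===== CLAIM (what is proved, stated in full; the proofs are below) =====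
def Claim_equal_helix_weave : Prop := ∀ (lst : List Int), Dom_helix_weave lst → Spec_helix_weave lst (helix_weave lst)

-- ===== LEMMAS AND PROOFS =====

-- transform of a value (shared by both programs)
def hwC (v : Int) : Int := if PySem.Int.mod v 2 = 0 then PySem.Int.floordiv v 2 else v * 2
-- weight of a position
def hwW (p : Int) : Int :=
  if PySem.Int.mod p 3 = 0 then 3 else if PySem.Int.mod p 3 = 1 then 2 else -1
-- per-pair contribution
def hwTerm (iv : Int × Int) : Int := hwW iv.1 * hwC iv.2

-- weighted sum of the segment [left, n-1-left] of lst, peeled from both ends,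
-- with positions 2*left, 2*left+1, … — the bridge between the two programs.
def hwSeg (lst : List Int) (left : Nat) : Int :=
  if lst.length ≤ 2 * left then 0
  else if lst.length = 2 * left + 1 then hwW (2 * left) * hwC (lst.getD left 0)
  else hwW (2 * left) * hwC (lst.getD left 0)
       + hwW (2 * left + 1) * hwC (lst.getD (lst.length - 1 - left) 0)
       + hwSeg lst (left + 1)
termination_by lst.length - 2 * left
decreasing_by omega

theorem hwW_tuple (p : Int) (_hp : 0 ≤ p) :
    PySem.List.pyGetD [3, 2, -1] (PySem.Int.mod p 3) 0 = hwW p := by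
  have h0 : 0 ≤ PySem.Int.mod p 3 := PySem.Int.mod_nonneg p (by omega)
  have h3 : PySem.Int.mod p 3 < 3 := PySem.Int.mod_lt p (by omega)
  clear _hp
  unfold hwW
  interval_cases h : (PySem.Int.mod p 3) <;> decide

-- A's fold is the sum of hwTerm over the enumeration.
theorem foldA_eq_sum (l : List (Int × Int)) :
    l.foldl (fun acc iv =>
      let contrib := if PySem.Int.mod iv.2 2 = 0 then PySem.Int.floordiv iv.2 2 else iv.2 * 2
      if PySem.Int.mod iv.1 3 = 0 then acc + contrib * 3
      else if PySem.Int.mod iv.1 3 = 1 then acc + contrib * 2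
      else acc - contrib) 0
    = (l.map hwTerm).sum := by
  have := PySem.List.foldl_congr_mem (l := l) (init := (0 : Int))
    (f := fun acc iv =>
      let contrib := if PySem.Int.mod iv.2 2 = 0 then PySem.Int.floordiv iv.2 2 else iv.2 * 2
      if PySem.Int.mod iv.1 3 = 0 then acc + contrib * 3
      else if PySem.Int.mod iv.1 3 = 1 then acc + contrib * 2
      else acc - contrib)
    (g := fun acc iv => acc + hwTerm iv)
    (by intro acc iv _; simp only [hwTerm, hwW, hwC]; split_ifs <;> ring)
  rw [this, PySem.List.foldl_add]; simp

-- A's interleave of the segment [left, n-1-left], enumerated from 2*left, sums to hwSeg.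
theorem weave_sum (lst : List Int) (left : Nat) :
    ((PySem.List.enumerate (weaveAux lst left ((lst.length : Int) - 1 - left)) (2 * left)).map hwTerm).sum
    = hwSeg lst left := by
  induction' hn : lst.length - 2 * left using Nat.strong_induction_on with k IH generalizing left
  unfold weaveAux hwSeg
  by_cases hle : (left : Int) ≤ (lst.length : Int) - 1 - left
  · have hlt : ¬ lst.length ≤ 2 * left := by omega
    by_cases hmid : (left : Int) = (lst.length : Int) - 1 - left
    · -- middle element: exactly one item appended, recursive call is empty
      have hmid' : lst.length = 2 * left + 1 := by omega
      have hrec : weaveAux lst (left + 1) ((lst.length : Int) - 1 - left - 1) = [] := by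
        rw [weaveAux]; simp; omega
      simp only [dif_pos hle, if_neg (by omega : ¬ (left : Int) ≠ (lst.length : Int) - 1 - left), hrec]
      simp [hmid', PySem.List.enumerate_cons, hwTerm]
    · have hne : lst.length ≠ 2 * left + 1 := by omega
      have hcast : (lst.length : Int) - 1 - left = ((lst.length - 1 - left : Nat) : Int) := by omega
      have harg : (lst.length : Int) - 1 - ((left : Nat) + 1 : Nat) = (lst.length : Int) - 1 - left - 1 := by
        push_cast
        ring_nf
      have hrec := IH (lst.length - 2 * (left + 1)) (by omega) (left + 1) rfl
      rw [harg] at hrec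
      simp only [dif_pos hle, if_pos hmid]
      rw [hcast]
      simp only [List.cons_append, List.nil_append, PySem.List.enumerate_cons,
        PySem.List.pyGetD_natCast, List.map_cons, List.sum_cons]
      have h2 : (2 * (left : Int)) + 1 + 1 = 2 * ((left : Nat) + 1 : Nat) := by push_cast; ring
      rw [h2]
      rw [show ((lst.length - 1 - left : Nat) : Int) - 1 = (lst.length : Int) - 1 - (left : Int) - 1 from by omega]
      rw [show ((left : Int) + 1) = (((left : Nat) + 1 : Nat) : Int) from by push_cast; ring]
      rw [hrec]
      simp only [if_neg hlt, if_neg hne, hwTerm]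
      push_cast; ring
  · have hge : lst.length ≤ 2 * left := by omega
    simp [dif_neg hle, hge, PySem.List.enumerate_nil]

-- B's per-index term, as a function of the Nat index
def hwF (lst : List Int) (j : Nat) : Int :=
  hwW (if 2 * (j : Int) ≤ (lst.length : Int) - 1 then 2 * (j : Int)
       else 2 * ((lst.length : Int) - 1 - j) + 1) * hwC (lst.getD j 0)

-- summing hwF over the index segment [left, n-1-left] gives hwSeg
theorem range'_sum_eq_seg (lst : List Int) (left : Nat) :
    ((List.range' left (lst.length - 2 * left)).map (hwF lst)).sum = hwSeg lst left := by
  induction' hn : lst.length - 2 * left using Nat.strong_induction_on with k IH generalizing left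
  unfold hwSeg
  rcases k with _ | (_ | k')
  · have h0 : lst.length ≤ 2 * left := by omega
    simp [h0]
  · have hmid : lst.length = 2 * left + 1 := by omega
    have hp : 2 * (left : Int) ≤ (lst.length : Int) - 1 := by omega
    simp [hwF, hmid]
  · have h1 : ¬ lst.length ≤ 2 * left := by omega
    have h2 : lst.length ≠ 2 * left + 1 := by omega
    have hsplit : List.range' left (k' + 1 + 1) = left :: (List.range' (left + 1) k' ++ [left + 1 + k']) := by
      rw [List.range'_succ, List.range'_concat]; simp
    have hrec := IH k' (by omega) (left + 1) (by omega)
    rw [hsplit]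
    simp only [List.sum_cons, List.map_append, List.sum_append, List.map, List.sum_nil]
    rw [hrec]
    have hfl : hwF lst left = hwW (2 * left) * hwC (lst.getD left 0) := by
      unfold hwF
      rw [if_pos (by omega : 2 * (left : Int) ≤ (lst.length : Int) - 1)]
    have hfr : hwF lst (left + 1 + k') = hwW (2 * left + 1) * hwC (lst.getD (lst.length - 1 - left) 0) := by
      unfold hwF
      rw [if_neg (by omega : ¬ 2 * ((left + 1 + k' : Nat) : Int) ≤ (lst.length : Int) - 1)]
      have hj : (left + 1 + k' : Nat) = lst.length - 1 - left := by omega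
      have heq : 2 * ((lst.length : Int) - 1 - ((left + 1 + k' : Nat) : Int)) + 1 = 2 * (left : Int) + 1 := by
        push_cast; omega
      rw [heq, hj]
    rw [hfl, hfr]
    simp only [if_neg h1, if_neg h2]
    ring
-- (end of segment lemma)

-- B's fold is the same segment sum starting at left = 0.
theorem altB_eq_seg (lst : List Int) : helix_weave_alt lst = |hwSeg lst 0| := by
  unfold helix_weave_alt
  simp only [PySem.List.len_eq]
  have hcong := PySem.List.foldl_congr_mem'
    (l := PySem.List.enumerate lst) (init := (0 : Int))
    (f := fun acc jv =>
      let p := if 2 * jv.1 ≤ ((lst.length : Int)) - 1 then 2 * jv.1 else 2 * (((lst.length : Int)) - 1 - jv.1) + 1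
      let contrib := if PySem.Int.mod jv.2 2 = 0 then PySem.Int.floordiv jv.2 2 else jv.2 * 2
      acc + PySem.List.pyGetD [3, 2, -1] (PySem.Int.mod p 3) 0 * contrib)
    (g := fun acc jv =>
      acc + hwW (if 2 * jv.1 ≤ ((lst.length : Int)) - 1 then 2 * jv.1 else 2 * (((lst.length : Int)) - 1 - jv.1) + 1) * hwC jv.2)
    (by
      intro jv hjv acc
      rcases (PySem.List.mem_enumerate_iff _ _ _).1 hjv with ⟨idx, hidx, rfl⟩
      simp only []
      rw [hwW_tuple _ (by split_ifs <;> omega)]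
      rfl)
  rw [hcong, PySem.List.foldl_add]
  congr 1
  rw [zero_add]
  rw [PySem.List.enumerate_eq_map_pyRange lst 0, PySem.List.len_eq,
    PySem.List.pyRange_zero_natCast, List.map_map, List.map_map]
  rw [← range'_sum_eq_seg lst 0]
  rw [Nat.sub_zero, ← List.range_eq_range']
  refine congrArg List.sum (List.map_congr_left ?_)
  intro j _
  simp only [Function.comp, PySem.List.pyGetD_natCast, hwF]

-- ===== VERDICT (by name: the statement is the Claim_ definition above) =====
theorem helix_weave_spec : Claim_equal_helix_weave := by
  intro lst _
  unfold Spec_helix_weave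
  rw [altB_eq_seg]
  unfold helix_weave
  simp only [PySem.List.len_eq]
  rw [foldA_eq_sum]
  have := weave_sum lst 0
  simp only [Nat.cast_zero, mul_zero, sub_zero] at this
  rw [this]
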